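-- pv_equiv track=rewrite | github.com/HyelenaZ/BaekjoonHub | 백준/Silver/2941. 크로아티아 알파벳/크로아티아 알파벳.py | count_cro_alphabets
-- ===== SOURCE A (Python) =====
-- def count_cro_alphabets(word):
--     cro_alphabets = ["c=", "c-", "dz=", "d-", "lj", "nj", "s=", "z="]
--
--     count = 0
--     i = 0
--     while i < len(word):
--         if word[i:i+3] == "dz=":
--             count += 1
--             i += 3
--         elif word[i:i+2] in cro_alphabets:
--             count += 1
--             i += 2
--         else:
--             count += 1
--             i += 1
--     return count
-- ===== SOURCE B (Python) =====
-- def count_cro_alphabets(word):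
--     # Each Croatian digraph/trigraph collapses to one counted letter; the
--     # patterns never overlap one another (no pattern's last char starts
--     # another), except that the trigraph contains one occurrence of the
--     # digraph it ends with -- which the subtraction below accounts for.
--     d = word.count("dz=")
--     two = sum(word.count(p) for p in ["c=", "c-", "d-", "lj", "nj", "s=", "z="])
--     return len(word) - d - two
-- ===== Notes on version B (the rewrite author's own statement) =====
-- stated objective: faster
-- what changed: Replaces A's per-character index-advancing greedy scan with global substring counting: the length of the word minus one per pattern occurrence, using that the eight patterns never overlap and that the three-character pattern contains exactly one occurrence of the two-character pattern it ends with; the counting runs in C-level str.count instead of a Python loop.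
import Mathlib
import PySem

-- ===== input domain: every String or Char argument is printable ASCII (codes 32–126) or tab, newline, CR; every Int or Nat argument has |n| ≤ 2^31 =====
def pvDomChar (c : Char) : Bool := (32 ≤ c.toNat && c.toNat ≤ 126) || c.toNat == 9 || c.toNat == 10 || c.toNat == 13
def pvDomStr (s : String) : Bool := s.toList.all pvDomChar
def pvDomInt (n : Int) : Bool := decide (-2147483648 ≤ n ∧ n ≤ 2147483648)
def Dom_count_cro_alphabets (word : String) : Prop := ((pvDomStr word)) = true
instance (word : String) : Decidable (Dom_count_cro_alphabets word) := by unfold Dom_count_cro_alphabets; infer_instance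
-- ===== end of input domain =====

-- B replaces A's per-character index-advancing scan by global substring counting
-- (length minus one per pattern occurrence; measurably faster: C-level counting in Python,
-- and the Lean port mirrors that structure).

-- ===== PORT A =====
def croAlphabets : List (List Char) :=
  [['c','='], ['c','-'], ['d','z','='], ['d','-'], ['l','j'], ['n','j'], ['s','='], ['z','=']]

def croLoop (w : List Char) (count : Int) (i : Int) : Int :=
  if _h : i < (w.length : Int) then
    if PySem.List.slice w (some i) (some (i + 3)) = ['d','z','='] then
      croLoop w (count + 1) (i + 3)
    else if croAlphabets.contains (PySem.List.slice w (some i) (some (i + 2))) then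
      croLoop w (count + 1) (i + 2)
    else
      croLoop w (count + 1) (i + 1)
  else count
termination_by ((w.length : Int) - i).toNat
decreasing_by all_goals omega

def count_cro_alphabets (word : String) : Int := croLoop word.toList 0 0

-- ===== PORT B =====
def croTwoChar : List String := ["c=", "c-", "d-", "lj", "nj", "s=", "z="]

def count_cro_alphabets_alt (word : String) : Int :=
  let d : Nat := PySem.Str.count word "dz="
  let two : Nat := (croTwoChar.map (fun p => PySem.Str.count word p)).sum
  (PySem.Str.len word : Int) - (d : Int) - (two : Int)

-- ===== PRECONDITION & SPEC =====
def Spec_count_cro_alphabets (word : String) (out : Int) : Prop := out = count_cro_alphabets_alt word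
instance (word : String) (out : Int) : Decidable (Spec_count_cro_alphabets word out) := by unfold Spec_count_cro_alphabets; infer_instance

-- ===== CLAIM (what is proved, stated in full; the proofs are below) =====
def Claim_equal_count_cro_alphabets : Prop := ∀ (word : String), Dom_count_cro_alphabets word → Spec_count_cro_alphabets word (count_cro_alphabets word)

-- ===== LEMMAS AND PROOFS =====
theorem croGoZero (sub : List Char) (l : List Char) (acc : Nat) :
    PySem.Chars.count.go sub 0 l acc = acc := by
  rw [PySem.Chars.count.go]
theorem croGoNil (sub : List Char) (fuel : Nat) (acc : Nat) :
    PySem.Chars.count.go sub fuel [] acc = acc := by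
  cases fuel
  · exact croGoZero sub [] acc
  · rw [PySem.Chars.count.go]; simp
theorem croGoAcc (sub : List Char) (fuel : Nat) : ∀ (l : List Char) (acc : Nat),
    PySem.Chars.count.go sub fuel l acc = acc + PySem.Chars.count.go sub fuel l 0 := by
  induction fuel with
  | zero => intro l acc; rw [croGoZero, croGoZero]; omega
  | succ n ih =>
    intro l acc
    cases l with
    | nil => rw [croGoNil, croGoNil]; omega
    | cons a t =>
      rw [PySem.Chars.count.go, PySem.Chars.count.go]
      split
      · rw [ih _ (acc + 1), ih _ (0 + 1)]; omega
      · exact ih t acc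
theorem croGoFuel (sub : List Char) (hs : sub ≠ []) : ∀ (n : Nat) (l : List Char), l.length ≤ n →
    ∀ (f f' acc : Nat), l.length ≤ f → l.length ≤ f' →
    PySem.Chars.count.go sub f l acc = PySem.Chars.count.go sub f' l acc := by
  intro n
  induction n with
  | zero =>
    intro l hl f f' acc _ _
    have : l = [] := List.eq_nil_of_length_eq_zero (Nat.le_zero.mp hl)
    subst this; rw [croGoNil, croGoNil]
  | succ n ih =>
    intro l hl f f' acc hf hf'
    cases l with
    | nil => rw [croGoNil, croGoNil]
    | cons a t =>
      obtain ⟨g, rfl⟩ : ∃ g, f = g + 1 := ⟨f - 1, by simp at hf; omega⟩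
      obtain ⟨g', rfl⟩ : ∃ g', f' = g' + 1 := ⟨f' - 1, by simp at hf'; omega⟩
      rw [PySem.Chars.count.go, PySem.Chars.count.go]
      split
      · rename_i hpre
        have hsl : 1 ≤ sub.length := by
          cases sub with | nil => exact absurd rfl hs | cons x xs => simp
        have hlen : (List.drop sub.length (a :: t)).length ≤ t.length := by
          simp; omega
        simp only [List.length_cons] at hl hf hf'
        exact ih _ (by omega) _ _ _ (by omega) (by omega)
      · simp only [List.length_cons] at hl hf hf'
        exact ih t (by omega) _ _ _ (by omega) (by omega)
theorem croCountCons (a : Char) (l sub : List Char) (hs : sub ≠ []) :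
    PySem.Chars.count (a :: l) sub =
      if sub.isPrefixOf (a :: l) then
        1 + PySem.Chars.count (List.drop sub.length (a :: l)) sub
      else PySem.Chars.count l sub := by
  have hse : sub.isEmpty = false := by cases sub with | nil => exact absurd rfl hs | cons x xs => rfl
  have hsl : 1 ≤ sub.length := by cases sub with | nil => exact absurd rfl hs | cons x xs => simp
  conv_lhs => rw [PySem.Chars.count]
  simp only [hse, Bool.false_eq_true, if_false, List.length_cons]
  rw [PySem.Chars.count.go]
  by_cases hp : sub.isPrefixOf (a :: l) = true
  · rw [if_pos hp, if_pos hp, croGoAcc]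
    have hlen : (List.drop sub.length (a :: l)).length ≤ l.length := by simp; omega
    conv_rhs => rw [PySem.Chars.count]
    simp only [hse, Bool.false_eq_true, if_false]
    rw [croGoFuel sub hs l.length _ hlen l.length (List.drop sub.length (a :: l)).length 0 (by omega) (by omega)]
  · rw [if_neg hp, if_neg hp]
    conv_rhs => rw [PySem.Chars.count]
    simp [hse]
def croF (m : List Char) : Int :=
  (m.length : Int) - (PySem.Chars.count m ['d','z','='] : Int) -
    ((PySem.Chars.count m ['c','='] : Int) + (PySem.Chars.count m ['c','-'] : Int) +
     (PySem.Chars.count m ['d','-'] : Int) + (PySem.Chars.count m ['l','j'] : Int) +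
     (PySem.Chars.count m ['n','j'] : Int) + (PySem.Chars.count m ['s','='] : Int) +
     (PySem.Chars.count m ['z','='] : Int))
theorem croF_dz (r : List Char) : croF ('d' :: 'z' :: '=' :: r) = 1 + croF r := by
  simp [croF, croCountCons, List.isPrefixOf]
  ring
theorem croF_two (a b : Char) (r : List Char) (h : [a, b] ∈ croAlphabets) :
    croF (a :: b :: r) = 1 + croF r := by
  simp only [croAlphabets, List.mem_cons, List.not_mem_nil, or_false] at h
  rcases h with h | h | h | h | h | h | h | h <;> first
    | (simp only [List.cons.injEq, and_true] at h
       obtain ⟨rfl, rfl⟩ := h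
       simp [croF, croCountCons, List.isPrefixOf]; ring)
    | simp at h
theorem croCountConsNeg (a : Char) (l sub : List Char) (hs : sub ≠ [])
    (h : ¬ sub.isPrefixOf (a :: l) = true) :
    PySem.Chars.count (a :: l) sub = PySem.Chars.count l sub := by
  rw [croCountCons a l sub hs, if_neg h]
theorem croF_one (a : Char) (r : List Char)
    (h3 : (a :: r).take 3 ≠ ['d','z','='])
    (h2 : ¬ (a :: r).take 2 ∈ croAlphabets) :
    croF (a :: r) = 1 + croF r := by
  have hnp : ∀ p : List Char, p ∈ croAlphabets → ¬ p.isPrefixOf (a :: r) = true := by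
    intro p hp hpre
    have hpre' : p <+: (a :: r) := List.isPrefixOf_iff_prefix.mp hpre
    have htake : (a :: r).take p.length = p := (List.prefix_iff_eq_take.mp hpre').symm
    fin_cases hp <;> simp_all [croAlphabets]
  simp only [croAlphabets, List.mem_cons, List.not_mem_nil, or_false, forall_eq_or_imp,
    forall_eq] at hnp
  obtain ⟨h1, hb2, hb3, hb4, hb5, hb6, hb7, hb8⟩ := hnp
  simp only [croF, croCountConsNeg a r _ (by simp) h1,
    croCountConsNeg a r _ (by simp) hb2, croCountConsNeg a r _ (by simp) hb3,
    croCountConsNeg a r _ (by simp) hb4, croCountConsNeg a r _ (by simp) hb5,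
    croCountConsNeg a r _ (by simp) hb6, croCountConsNeg a r _ (by simp) hb7,
    croCountConsNeg a r _ (by simp) hb8, List.length_cons]
  push_cast
  ring
theorem croDropCons (l : List Char) (i : Int) (hi : 0 ≤ i) (hlt : i < (l.length : Int)) :
    ∃ a r, l.drop i.toNat = a :: r := by
  cases h : l.drop i.toNat with
  | nil =>
    have := congrArg List.length h
    simp at this
    omega
  | cons a r => exact ⟨a, r, rfl⟩
theorem croSlice (l : List Char) (i k : Int) (hi : 0 ≤ i) (hk : 0 ≤ k) :
    PySem.List.slice l (some i) (some (i + k)) = (l.drop i.toNat).take k.toNat := by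
  rw [PySem.List.slice_toNat l hi (by omega)]
  congr 1
  omega
theorem croLoop_eq (l : List Char) (c i : Int) :
    0 ≤ i → croLoop l c i = c + croF (l.drop i.toNat) := by
  induction c, i using croLoop.induct l with
  | case1 c i hlt hdz ih =>
    intro hi
    rw [croLoop, dif_pos hlt, if_pos hdz]
    rw [croSlice l i 3 hi (by omega)] at hdz
    obtain ⟨a, r, hm⟩ := croDropCons l i hi hlt
    rw [hm] at hdz
    rw [ih (by omega)]
    have h3 : (i + 3).toNat = i.toNat + 3 := by omega
    rw [h3, ← List.drop_drop, hm]
    -- a :: r has take 3 = ['d','z','='], so it is 'd' :: 'z' :: '=' :: r''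
    rcases r with - | ⟨b, r'⟩
    · simp at hdz
    · rcases r' with - | ⟨c2, r''⟩
      · simp at hdz
      · simp at hdz
        obtain ⟨rfl, rfl, rfl⟩ := hdz
        rw [show List.drop 3 ('d' :: 'z' :: '=' :: r'') = r'' from rfl, croF_dz]
        ring
  | case2 c i hlt hdz hmem ih =>
    intro hi
    rw [croLoop, dif_pos hlt, if_neg hdz, if_pos hmem]
    rw [croSlice l i 2 hi (by omega)] at hmem
    obtain ⟨a, r, hm⟩ := croDropCons l i hi hlt
    rw [hm] at hmem
    rw [ih (by omega)]
    have h2 : (i + 2).toNat = i.toNat + 2 := by omega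
    rw [h2, ← List.drop_drop, hm]
    match a, r, hmem with
    | a, [], hmem =>
      have hx := List.contains_iff_mem.mp hmem
      simp [croAlphabets] at hx
    | a, b :: r', hmem =>
      have hmem' : [a, b] ∈ croAlphabets := by
        simpa using List.contains_iff_mem.mp hmem
      rw [show List.drop 2 (a :: b :: r') = r' from rfl, croF_two a b r' hmem']
      ring
  | case3 c i hlt hdz hmem ih =>
    intro hi
    rw [croLoop, dif_pos hlt, if_neg hdz, if_neg (by simpa using hmem)]
    rw [croSlice l i 3 hi (by omega)] at hdz
    rw [croSlice l i 2 hi (by omega)] at hmem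
    obtain ⟨a, r, hm⟩ := croDropCons l i hi hlt
    rw [hm] at hdz hmem
    rw [ih (by omega)]
    have h1 : (i + 1).toNat = i.toNat + 1 := by omega
    rw [h1, ← List.drop_drop, hm]
    rw [show List.drop 1 (a :: r) = r from rfl]
    rw [croF_one a r (by simpa using hdz) (by simpa using List.contains_iff_mem.not.mp hmem)]
    ring
  | case4 c i hge =>
    intro hi
    rw [croLoop, dif_neg hge]
    have hl : l.length ≤ i.toNat := by omega
    rw [List.drop_of_length_le hl]
    have : croF [] = 0 := by decide
    rw [this, add_zero]

-- ===== VERDICT (by name: the statement is the Claim_ definition above) =====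
theorem count_cro_alphabets_spec : Claim_equal_count_cro_alphabets := by
  intro word _
  unfold Spec_count_cro_alphabets count_cro_alphabets count_cro_alphabets_alt
  rw [croLoop_eq word.toList 0 0 (by omega)]
  simp [croTwoChar, croF, PySem.Str.count_eq, PySem.Str.len]
  ring
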